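-- pv_equiv track=rewrite | github.com/eliasuriel/Automation | gen_functions.py | relacionar_nombres
-- ===== SOURCE A (Python) =====
-- def relacionar_nombres(arr1, arr2):
--     relacion = {}
--     for nombre1 in arr1:
--         mejor_coincidencia = ""
--         longitud_coincidencia = 0
--         for nombre2 in arr2:
--             lcs = longest_common_substring(nombre1, nombre2)
--             if len(lcs) > longitud_coincidencia:
--                 mejor_coincidencia = nombre2
--                 longitud_coincidencia = len(lcs)
--         relacion[nombre1] = mejor_coincidencia
--     return relacion
--
-- def longest_common_substring(s1, s2):
--     m = len(s1)
--     n = len(s2)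
--     matriz = [[0] * (n + 1) for _ in range(m + 1)]
--     longitud_max = 0
--     final_indice = 0
--     for i in range(1, m + 1):
--         for j in range(1, n + 1):
--             if s1[i - 1] == s2[j - 1]:
--                 matriz[i][j] = matriz[i - 1][j - 1] + 1
--                 if matriz[i][j] > longitud_max:
--                     longitud_max = matriz[i][j]
--                     final_indice = i
--             else:
--                 matriz[i][j] = 0
--     return s1[final_indice - longitud_max:final_indice]
-- ===== SOURCE B (Python) =====
-- def _lcs_len(s1, s2):
--     # length of the longest common substring: try lengths from the top;
--     # the first length with a shared window is the answer
--     for L in range(min(len(s1), len(s2)), 0, -1):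
--         windows = {s1[i:i + L] for i in range(len(s1) - L + 1)}
--         if any(s2[j:j + L] in windows for j in range(len(s2) - L + 1)):
--             return L
--     return 0
--
-- def _best_match(n1, arr2):
--     lens = [_lcs_len(n1, n2) for n2 in arr2]
--     best = max(lens, default=0)
--     return arr2[lens.index(best)] if best > 0 else ""
--
-- def relacionar_nombres(arr1, arr2):
--     return {n1: _best_match(n1, arr2) for n1 in arr1}
-- ===== Notes on version B (the rewrite author's own statement) =====
-- stated objective: alternative
-- what changed: B computes each pair's longest-common-substring length by scanning candidate lengths from the top with a set of substring windows (first shared window wins) instead of A's (m+1)x(n+1) DP matrix, and picks each name's best partner with a two-pass max+index over the score list instead of A's running-max accumulator.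
import Mathlib
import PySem

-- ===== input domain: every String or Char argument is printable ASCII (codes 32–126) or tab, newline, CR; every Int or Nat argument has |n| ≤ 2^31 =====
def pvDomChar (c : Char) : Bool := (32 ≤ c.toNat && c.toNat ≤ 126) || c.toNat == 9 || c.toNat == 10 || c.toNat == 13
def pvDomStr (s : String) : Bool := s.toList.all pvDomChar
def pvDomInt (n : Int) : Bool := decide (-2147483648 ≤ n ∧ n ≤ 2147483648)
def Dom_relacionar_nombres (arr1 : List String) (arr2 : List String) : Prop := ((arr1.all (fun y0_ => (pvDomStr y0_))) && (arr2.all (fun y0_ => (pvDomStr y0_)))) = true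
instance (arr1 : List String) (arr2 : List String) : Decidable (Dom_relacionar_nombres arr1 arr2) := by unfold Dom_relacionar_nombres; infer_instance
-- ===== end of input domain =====

-- B computes each pair's longest-common-substring length by trying lengths from the top with a
-- substring-window set instead of A's DP matrix, and picks the best partner by max+index;
-- objective: alternative (same results, genuinely different algorithm).

-- ===== PORT A =====
-- matriz[i][j] read / write (indices are always in range in A's loops)
def pvMatGet (mat : List (List Int)) (i j : Int) : Int :=
  PySem.List.pyGetD (PySem.List.pyGetD mat i []) j 0

def pvMatSet (mat : List (List Int)) (i j : Int) (v : Int) : List (List Int) :=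
  PySem.List.pySetD mat i (PySem.List.pySetD (PySem.List.pyGetD mat i []) j v)

-- body of A's inner 'for j in range(1, n+1)' loop
def pvInner (cs1 cs2 : List Char) (i : Int) (st : List (List Int) × Int × Int) (j : Int) :
    List (List Int) × Int × Int :=
  if PySem.List.pyGet? cs1 (i - 1) = PySem.List.pyGet? cs2 (j - 1) then
    let v := pvMatGet st.1 (i - 1) (j - 1) + 1
    let mat := pvMatSet st.1 i j v
    if v > st.2.1 then (mat, v, i) else (mat, st.2.1, st.2.2)
  else (pvMatSet st.1 i j 0, st.2.1, st.2.2)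

-- body of A's outer 'for i in range(1, m+1)' loop
def pvOuter (cs1 cs2 : List Char) (st : List (List Int) × Int × Int) (i : Int) :
    List (List Int) × Int × Int :=
  (PySem.List.pyRange 1 (PySem.List.len cs2 + 1) 1).foldl (pvInner cs1 cs2 i) st

def longest_common_substring (s1 s2 : String) : String :=
  let cs1 := s1.toList
  let cs2 := s2.toList
  let m := PySem.List.len cs1
  let n := PySem.List.len cs2
  let matriz : List (List Int) :=
    (PySem.List.pyRange 0 (m + 1) 1).map (fun _ => PySem.List.pyRepeat [(0 : Int)] (n + 1))
  let st := (PySem.List.pyRange 1 (m + 1) 1).foldl (pvOuter cs1 cs2) (matriz, (0 : Int), (0 : Int))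
  String.ofList (PySem.List.slice cs1 (some (st.2.2 - st.2.1)) (some st.2.2))

def relacionar_nombres (arr1 : List String) (arr2 : List String) : List (String × String) :=
  (arr1.foldl (fun rel nombre1 =>
      let best := arr2.foldl (fun st nombre2 =>
          let lcs := longest_common_substring nombre1 nombre2
          if PySem.Str.len lcs > st.2 then (nombre2, PySem.Str.len lcs) else st)
        ("", (0 : Int))
      rel.insert nombre1 best.1)
    (PySem.Dict.empty : PySem.Dict String String)).items

-- ===== PORT B =====
-- all windows s[i:i+L], i in range(len(s)-L+1)
def pvWindows (cs : List Char) (L : Nat) : List (List Char) :=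
  (PySem.List.pyRange 0 (PySem.List.len cs - (L : Int) + 1) 1).map
    (fun i => PySem.List.slice cs (some i) (some (i + (L : Int))))

-- B's 'for L in range(min(len(s1), len(s2)), 0, -1)' loop, returning at the first shared window
def pvLcsLenRec (cs1 cs2 : List Char) : Nat → Int
  | 0 => 0
  | L + 1 =>
    let windows : PySem.Set (List Char) := PySem.Set.ofList (pvWindows cs1 (L + 1))
    if (pvWindows cs2 (L + 1)).any (fun w => PySem.Set.contains windows w) then ((L : Int) + 1)
    else pvLcsLenRec cs1 cs2 L

def pvLcsLen (s1 s2 : String) : Int :=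
  pvLcsLenRec s1.toList s2.toList (min s1.toList.length s2.toList.length)

def pvBestMatch (n1 : String) (arr2 : List String) : String :=
  let lens := arr2.map (fun n2 => pvLcsLen n1 n2)
  let best := PySem.List.maxD lens (fun x => x) 0
  if best > 0 then
    match PySem.List.index? lens best with
    | some k => (PySem.List.pyGet? arr2 (k : Int)).getD ""  -- lens.index(best) < len(arr2): always in range
    | none => ""
  else ""

def relacionar_nombres_alt (arr1 : List String) (arr2 : List String) : List (String × String) :=
  (arr1.foldl (fun d n1 => d.insert n1 (pvBestMatch n1 arr2))
    (PySem.Dict.empty : PySem.Dict String String)).items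

-- ===== PRECONDITION & SPEC =====
def Spec_relacionar_nombres (arr1 : List String) (arr2 : List String) (out : List (String × String)) : Prop := out = relacionar_nombres_alt arr1 arr2
instance (arr1 : List String) (arr2 : List String) (out : List (String × String)) : Decidable (Spec_relacionar_nombres arr1 arr2 out) := by unfold Spec_relacionar_nombres; infer_instance

-- ===== CLAIM (what is proved, stated in full; the proofs are below) =====
def Claim_equal_relacionar_nombres : Prop := ∀ (arr1 : List String) (arr2 : List String), Dom_relacionar_nombres arr1 arr2 → Spec_relacionar_nombres arr1 arr2 (relacionar_nombres arr1 arr2)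

-- ===== LEMMAS AND PROOFS =====

-- the DP value: length of the longest common suffix of cs1[:i] and cs2[:j]
def pvLf (cs1 cs2 : List Char) : Nat → Nat → Nat
  | 0, _ => 0
  | _ + 1, 0 => 0
  | i + 1, j + 1 => if cs1[i]? = cs2[j]? then pvLf cs1 cs2 i j + 1 else 0

def pvRowMax (cs1 cs2 : List Char) (i : Nat) : Nat → Nat
  | 0 => 0
  | j + 1 => max (pvRowMax cs1 cs2 i j) (pvLf cs1 cs2 i (j + 1))

def pvMaxUpTo (cs1 cs2 : List Char) : Nat → Nat
  | 0 => 0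
  | i + 1 => max (pvMaxUpTo cs1 cs2 i) (pvRowMax cs1 cs2 (i + 1) cs2.length)

def pvBig (cs1 cs2 : List Char) : Nat := pvMaxUpTo cs1 cs2 cs1.length

def pvMget (mat : List (List Int)) (r c : Nat) : Int := (mat.getD r []).getD c 0

def pvShape (mat : List (List Int)) (M N : Nat) : Prop :=
  mat.length = M + 1 ∧ ∀ row ∈ mat, row.length = N + 1

def pvMOK (cs1 cs2 : List Char) (mat : List (List Int)) (i j : Nat) : Prop :=
  ∀ r c, c ≤ cs2.length → (r < i ∨ (r = i ∧ c ≤ j)) → pvMget mat r c = (pvLf cs1 cs2 r c : Int)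

lemma pvLf_le_left (cs1 cs2 : List Char) (i j : Nat) : pvLf cs1 cs2 i j ≤ i := by
  induction i generalizing j with
  | zero => simp [pvLf]
  | succ i ih =>
    cases j with
    | zero => simp [pvLf]
    | succ j =>
      simp only [pvLf]
      split
      · exact Nat.succ_le_succ (ih j)
      · omega

lemma pvLf_le_right (cs1 cs2 : List Char) (i j : Nat) : pvLf cs1 cs2 i j ≤ j := by
  induction i generalizing j with
  | zero => simp [pvLf]
  | succ i ih =>
    cases j with
    | zero => simp [pvLf]
    | succ j =>
      simp only [pvLf]
      split
      · exact Nat.succ_le_succ (ih j)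
      · omega

lemma pvGetD_set {α : Type} (l : List α) (i j : Nat) (a d : α) :
    (l.set i a).getD j d = if i = j ∧ i < l.length then a else l.getD j d := by
  by_cases h : i = j ∧ i < l.length
  · obtain ⟨rfl, hlt⟩ := h
    rw [if_pos ⟨rfl, hlt⟩, List.getD_eq_getElem?_getD, List.getElem?_set_self hlt,
      Option.getD_some]
  · rw [if_neg h, List.getD_eq_getElem?_getD]
    by_cases hij : i = j
    · subst hij
      rw [List.getElem?_eq_none (by simp; omega), List.getD_eq_default _ _ (by omega)]
      simp
    · rw [List.getElem?_set_ne hij, ← List.getD_eq_getElem?_getD]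

lemma pvMget_set (mat : List (List Int)) (M N r0 c0 : Nat) (v : Int)
    (hsh : pvShape mat M N) (hr : r0 ≤ M) (hc : c0 ≤ N) (r c : Nat) :
    pvMget (pvMatSet mat (r0 : Int) (c0 : Int) v) r c =
      if r = r0 ∧ c = c0 then v else pvMget mat r c := by
  obtain ⟨hlen, hrows⟩ := hsh
  have hr0 : r0 < mat.length := by omega
  have hrow : (mat.getD r0 []).length = N + 1 := by
    rw [List.getD_eq_getElem mat [] hr0]
    exact hrows _ (List.getElem_mem hr0)
  have hc0 : c0 < (mat.getD r0 []).length := by omega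
  unfold pvMatSet pvMget
  simp only [PySem.List.pySetD_natCast, PySem.List.pyGetD_natCast]
  rw [pvGetD_set]
  by_cases hr' : r0 = r
  · subst hr'
    rw [if_pos ⟨rfl, hr0⟩, pvGetD_set]
    by_cases hc' : c0 = c
    · subst hc'
      rw [if_pos ⟨rfl, hc0⟩, if_pos ⟨rfl, rfl⟩]
    · rw [if_neg (by tauto), if_neg (by tauto)]
  · rw [if_neg (by tauto), if_neg (by tauto)]

lemma pvShape_set (mat : List (List Int)) (M N : Nat) (r0 c0 : Nat) (v : Int)
    (hsh : pvShape mat M N) (hr : r0 ≤ M) :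
    pvShape (pvMatSet mat (r0 : Int) (c0 : Int) v) M N := by
  obtain ⟨hlen, hrows⟩ := hsh
  have hr0 : r0 < mat.length := by omega
  unfold pvMatSet
  simp only [PySem.List.pySetD_natCast, PySem.List.pyGetD_natCast]
  refine ⟨by simpa using hlen, ?_⟩
  intro row hrow
  rcases List.mem_or_eq_of_mem_set hrow with h | h
  · exact hrows _ h
  · subst h
    rw [List.length_set, List.getD_eq_getElem mat [] hr0]
    exact hrows _ (List.getElem_mem hr0)

def pvInnerGood (cs1 cs2 : List Char) (i t : Nat) (lmax : Int)
    (st' : List (List Int) × Int × Int) : Prop :=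
  pvShape st'.1 cs1.length cs2.length ∧ pvMOK cs1 cs2 st'.1 (i + 1) t ∧
    (∀ r c, i + 1 < r → pvMget st'.1 r c = 0) ∧
    (∀ c, t < c → pvMget st'.1 (i + 1) c = 0) ∧
    st'.2.1 = max lmax (pvRowMax cs1 cs2 (i + 1) t : Int) ∧
    st'.2.1 ≤ st'.2.2 ∧ st'.2.2 ≤ (i : Int) + 1

lemma pvStep (cs1 cs2 : List Char) (i t : Nat) (hi : i < cs1.length)
    (ht : t + 1 ≤ cs2.length) (st' : List (List Int) × Int × Int) (lmax : Int)
    (hg : pvInnerGood cs1 cs2 i t lmax st') :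
    pvInnerGood cs1 cs2 i (t + 1) lmax (pvInner cs1 cs2 ((i : Int) + 1) st' ((t : Int) + 1)) := by
  obtain ⟨sh', ok', z1', z2', lm', le1', le2'⟩ := hg
  have e1 : ((i : Int) + 1) = ((i + 1 : Nat) : Int) := by push_cast; ring
  have e2 : ((t : Int) + 1) = ((t + 1 : Nat) : Int) := by push_cast; ring
  have hidx1 : ((i : Int) + 1 - 1) = ((i : Nat) : Int) := by omega
  have hidx2 : ((t : Int) + 1 - 1) = ((t : Nat) : Int) := by omega
  have hget : pvMatGet st'.1 ((i : Nat) : Int) ((t : Nat) : Int) = (pvLf cs1 cs2 i t : Int) := by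
    unfold pvMatGet
    simp only [PySem.List.pyGetD_natCast]
    exact ok' i t (by omega) (Or.inl (by omega))
  have hLfle : pvLf cs1 cs2 (i + 1) (t + 1) ≤ i + 1 := pvLf_le_left _ _ _ _
  unfold pvInner
  rw [hidx1, hidx2, e1, e2]
  simp only [PySem.List.pyGet?_natCast]
  by_cases hch : cs1[i]? = cs2[t]?
  · rw [if_pos hch]
    have hLf : pvLf cs1 cs2 (i + 1) (t + 1) = pvLf cs1 cs2 i t + 1 := by
      simp [pvLf, hch]
    have hv : pvMatGet st'.1 ((i : Nat) : Int) ((t : Nat) : Int) + 1 =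
        (pvLf cs1 cs2 (i + 1) (t + 1) : Int) := by
      rw [hget, hLf]; push_cast; ring
    have hsh'' := pvShape_set st'.1 cs1.length cs2.length (i + 1) (t + 1)
      (pvMatGet st'.1 ((i : Nat) : Int) ((t : Nat) : Int) + 1) sh' (by omega)
    have hmok'' : pvMOK cs1 cs2
        (pvMatSet st'.1 ((i + 1 : Nat) : Int) ((t + 1 : Nat) : Int)
          (pvMatGet st'.1 ((i : Nat) : Int) ((t : Nat) : Int) + 1)) (i + 1) (t + 1) := by
      intro r c hc hcond
      rw [pvMget_set st'.1 cs1.length cs2.length (i + 1) (t + 1) _ sh' (by omega) (by omega)]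
      split_ifs with he
      · rw [he.1, he.2, hv]
      · exact ok' r c hc (by omega)
    have hz1'' : ∀ r c, i + 1 < r →
        pvMget (pvMatSet st'.1 ((i + 1 : Nat) : Int) ((t + 1 : Nat) : Int)
          (pvMatGet st'.1 ((i : Nat) : Int) ((t : Nat) : Int) + 1)) r c = 0 := by
      intro r c hr
      rw [pvMget_set st'.1 cs1.length cs2.length (i + 1) (t + 1) _ sh' (by omega) (by omega),
        if_neg (by omega)]
      exact z1' r c hr
    have hz2'' : ∀ c, t + 1 < c →
        pvMget (pvMatSet st'.1 ((i + 1 : Nat) : Int) ((t + 1 : Nat) : Int)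
          (pvMatGet st'.1 ((i : Nat) : Int) ((t : Nat) : Int) + 1)) (i + 1) c = 0 := by
      intro c hcgt
      rw [pvMget_set st'.1 cs1.length cs2.length (i + 1) (t + 1) _ sh' (by omega) (by omega),
        if_neg (by omega)]
      exact z2' c (by omega)
    by_cases hup : pvMatGet st'.1 ((i : Nat) : Int) ((t : Nat) : Int) + 1 > st'.2.1
    · rw [if_pos hup]
      refine ⟨hsh'', hmok'', hz1'', hz2'', ?_, ?_, by push_cast; omega⟩
      · show pvMatGet st'.1 ((i : Nat) : Int) ((t : Nat) : Int) + 1 =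
          max lmax (pvRowMax cs1 cs2 (i + 1) (t + 1) : Int)
        simp only [pvRowMax]
        rw [hget] at hup ⊢
        rw [lm'] at hup
        rw [hLf]
        push_cast at hup ⊢
        omega
      · show pvMatGet st'.1 ((i : Nat) : Int) ((t : Nat) : Int) + 1 ≤ ((i + 1 : Nat) : Int)
        rw [hv]
        exact_mod_cast Nat.cast_le.mpr hLfle
    · rw [if_neg hup]
      refine ⟨hsh'', hmok'', hz1'', hz2'', ?_, le1', le2'⟩
      show st'.2.1 = max lmax (pvRowMax cs1 cs2 (i + 1) (t + 1) : Int)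
      rw [hv] at hup
      simp only [pvRowMax]
      rw [lm'] at hup ⊢
      push_cast at hup ⊢
      omega
  · rw [if_neg hch]
    have hLf : pvLf cs1 cs2 (i + 1) (t + 1) = 0 := by
      simp [pvLf, hch]
    refine ⟨pvShape_set st'.1 cs1.length cs2.length (i + 1) (t + 1) 0 sh' (by omega),
      ?_, ?_, ?_, ?_, le1', le2'⟩
    · intro r c hc hcond
      rw [pvMget_set st'.1 cs1.length cs2.length (i + 1) (t + 1) _ sh' (by omega) (by omega)]
      split_ifs with he
      · rw [he.1, he.2, hLf]; rfl
      · exact ok' r c hc (by omega)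
    · intro r c hr
      rw [pvMget_set st'.1 cs1.length cs2.length (i + 1) (t + 1) _ sh' (by omega) (by omega),
        if_neg (by omega)]
      exact z1' r c hr
    · intro c hcgt
      rw [pvMget_set st'.1 cs1.length cs2.length (i + 1) (t + 1) _ sh' (by omega) (by omega),
        if_neg (by omega)]
      exact z2' c (by omega)
    · show st'.2.1 = max lmax (pvRowMax cs1 cs2 (i + 1) (t + 1) : Int)
      simp only [pvRowMax, hLf]
      rw [lm']
      push_cast
      omega

lemma pvInner_fold (cs1 cs2 : List Char) (i : Nat) (hi : i < cs1.length) (t : Nat)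
    (ht : t ≤ cs2.length) (mat : List (List Int)) (lmax fi : Int)
    (hsh : pvShape mat cs1.length cs2.length)
    (hok : pvMOK cs1 cs2 mat (i + 1) 0)
    (hz1 : ∀ r c, i + 1 < r → pvMget mat r c = 0)
    (hz2 : ∀ c, 0 < c → pvMget mat (i + 1) c = 0)
    (h0 : 0 ≤ lmax) (hlf : lmax ≤ fi) (hfi : fi ≤ (i : Int) + 1) :
    pvInnerGood cs1 cs2 i t lmax
      ((PySem.List.pyRange 1 ((t : Int) + 1) 1).foldl
        (pvInner cs1 cs2 ((i : Int) + 1)) (mat, lmax, fi)) := by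
  induction t with
  | zero =>
    rw [show ((0 : Nat) : Int) + 1 = 1 by norm_num, PySem.List.pyRange_one_eq_nil le_rfl,
      List.foldl_nil]
    exact ⟨hsh, hok, hz1, hz2, by simp [pvRowMax]; omega, hlf, hfi⟩
  | succ t ih =>
    have ht' : t ≤ cs2.length := by omega
    have hsplit : PySem.List.pyRange 1 (((t + 1 : Nat) : Int) + 1) 1 =
        PySem.List.pyRange 1 ((t : Int) + 1) 1 ++ [((t : Int) + 1)] := by
      push_cast
      rw [PySem.List.pyRange_one_succ_right (by omega)]
    rw [hsplit, List.foldl_append, List.foldl_cons, List.foldl_nil]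
    exact pvStep cs1 cs2 i t hi ht _ lmax (ih ht')

def pvInit (cs1 cs2 : List Char) : List (List Int) :=
  (PySem.List.pyRange 0 ((cs1.length : Int) + 1) 1).map
    (fun _ => PySem.List.pyRepeat [(0 : Int)] ((cs2.length : Int) + 1))

lemma pvInit_eq (cs1 cs2 : List Char) :
    pvInit cs1 cs2 = List.replicate (cs1.length + 1) (List.replicate (cs2.length + 1) (0 : Int)) := by
  unfold pvInit
  rw [PySem.List.pyRepeat_singleton, List.map_const', PySem.List.length_pyRange_one]
  congr 1

lemma pvMget_init (cs1 cs2 : List Char) (r c : Nat) : pvMget (pvInit cs1 cs2) r c = 0 := by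
  rw [pvInit_eq]
  unfold pvMget
  simp only [List.getD_eq_getElem?_getD, List.getElem?_replicate]
  split_ifs <;> simp

lemma pvShape_init (cs1 cs2 : List Char) : pvShape (pvInit cs1 cs2) cs1.length cs2.length := by
  rw [pvInit_eq]
  exact ⟨List.length_replicate, fun row hrow => by
    rw [List.eq_of_mem_replicate hrow]; exact List.length_replicate⟩

lemma pvLf_zero_left (cs1 cs2 : List Char) (c : Nat) : pvLf cs1 cs2 0 c = 0 := by
  simp [pvLf]

lemma pvLf_zero_right (cs1 cs2 : List Char) (i : Nat) : pvLf cs1 cs2 i 0 = 0 := by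
  cases i <;> simp [pvLf]

def pvOuterGood (cs1 cs2 : List Char) (t : Nat) (st' : List (List Int) × Int × Int) : Prop :=
  pvShape st'.1 cs1.length cs2.length ∧ pvMOK cs1 cs2 st'.1 t cs2.length ∧
    (∀ r c, t < r → pvMget st'.1 r c = 0) ∧
    st'.2.1 = (pvMaxUpTo cs1 cs2 t : Int) ∧ st'.2.1 ≤ st'.2.2 ∧ st'.2.2 ≤ (t : Int)

lemma pvOuter_fold (cs1 cs2 : List Char) (t : Nat) (ht : t ≤ cs1.length) :
    pvOuterGood cs1 cs2 t
      ((PySem.List.pyRange 1 ((t : Int) + 1) 1).foldl (pvOuter cs1 cs2)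
        (pvInit cs1 cs2, (0 : Int), (0 : Int))) := by
  induction t with
  | zero =>
    rw [show ((0 : Nat) : Int) + 1 = 1 by norm_num, PySem.List.pyRange_one_eq_nil le_rfl,
      List.foldl_nil]
    refine ⟨pvShape_init cs1 cs2, ?_, fun r c _ => pvMget_init cs1 cs2 r c, rfl, le_rfl, le_rfl⟩
    intro r c hc hcond
    have hr0 : r = 0 := by omega
    subst hr0
    rw [pvMget_init, pvLf_zero_left]
    rfl
  | succ t ih =>
    have ht' : t ≤ cs1.length := by omega
    obtain ⟨sh', ok', z', lm', le1', le2'⟩ := ih ht'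
    have hsplit : PySem.List.pyRange 1 (((t + 1 : Nat) : Int) + 1) 1 =
        PySem.List.pyRange 1 ((t : Int) + 1) 1 ++ [((t : Int) + 1)] := by
      push_cast
      rw [PySem.List.pyRange_one_succ_right (by omega)]
    rw [hsplit, List.foldl_append, List.foldl_cons, List.foldl_nil]
    set st' := (PySem.List.pyRange 1 ((t : Int) + 1) 1).foldl (pvOuter cs1 cs2)
      (pvInit cs1 cs2, (0 : Int), (0 : Int)) with hst'
    unfold pvOuter
    rw [PySem.List.len_eq]
    have h0 : (0 : Int) ≤ st'.2.1 := by rw [lm']; exact Int.natCast_nonneg _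
    have hfold := pvInner_fold cs1 cs2 t (by omega) cs2.length le_rfl st'.1 st'.2.1 st'.2.2
      sh'
      (by
        intro r c hc hcond
        rcases hcond with h | ⟨rfl, hc0⟩
        · exact ok' r c hc (by omega)
        · have hc0' : c = 0 := by omega
          subst hc0'
          rw [z' (t + 1) 0 (by omega), pvLf_zero_right]
          simp)
      (fun r c hr => z' r c (by omega))
      (fun c _ => z' (t + 1) c (by omega))
      h0 le1' (by omega)
    obtain ⟨sh'', ok'', z1'', z2'', lm'', le1'', le2''⟩ := hfold
    have hpack : (st'.1, st'.2.1, st'.2.2) = st' := rfl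
    rw [hpack] at sh'' ok'' z1'' z2'' lm'' le1'' le2''
    refine ⟨sh'', ok'', z1'', ?_, le1'', by push_cast at le2'' ⊢; omega⟩
    rw [lm'', lm']
    simp only [pvMaxUpTo]
    push_cast
    omega

-- A's helper returns a string of exactly the DP-maximum length
lemma lcsA_len (s1 s2 : String) :
    PySem.Str.len (longest_common_substring s1 s2) = (pvBig s1.toList s2.toList : Int) := by
  obtain ⟨sh, ok, z, lm, le1, le2⟩ :=
    pvOuter_fold s1.toList s2.toList s1.toList.length le_rfl
  set st := (PySem.List.pyRange 1 ((s1.toList.length : Int) + 1) 1).foldl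
    (pvOuter s1.toList s2.toList) (pvInit s1.toList s2.toList, (0 : Int), (0 : Int)) with hst
  have h0 : 0 ≤ st.2.1 := by rw [lm]; exact Int.natCast_nonneg _
  show PySem.Str.len (String.ofList
      (PySem.List.slice s1.toList (some (st.2.2 - st.2.1)) (some st.2.2))) =
    (pvBig s1.toList s2.toList : Int)
  rw [PySem.Str.len_eq]
  have htl : (String.ofList (PySem.List.slice s1.toList (some (st.2.2 - st.2.1))
      (some st.2.2))).toList = PySem.List.slice s1.toList (some (st.2.2 - st.2.1))
      (some st.2.2) := by simp
  rw [htl, show PySem.List.slice s1.toList (some (st.2.2 - st.2.1)) (some st.2.2) =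
      List.take (st.2.2.toNat - (st.2.2 - st.2.1).toNat)
        (List.drop (st.2.2 - st.2.1).toNat s1.toList) from
      PySem.List.slice_toNat _ (by omega) (by omega),
    List.length_take, List.length_drop]
  have hb : st.2.1 = (pvBig s1.toList s2.toList : Int) := lm
  omega

-- segment characterisation of the DP value
lemma pvLf_seg_iff (cs1 cs2 : List Char) (ℓ i j : Nat)
    (hi : i ≤ cs1.length) (hj : j ≤ cs2.length) :
    ℓ ≤ pvLf cs1 cs2 i j ↔
      ℓ ≤ i ∧ ℓ ≤ j ∧ (cs1.drop (i - ℓ)).take ℓ = (cs2.drop (j - ℓ)).take ℓ := by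
  induction ℓ generalizing i j with
  | zero => simp
  | succ ℓ ih =>
    match i, j with
    | 0, j =>
      simp only [pvLf_zero_left]
      constructor
      · intro h; omega
      · rintro ⟨h1, -, -⟩; omega
    | i + 1, 0 =>
      simp only [pvLf_zero_right]
      constructor
      · intro h; omega
      · rintro ⟨-, h2, -⟩; omega
    | i + 1, j + 1 =>
      have hi' : i < cs1.length := by omega
      have hj' : j < cs2.length := by omega
      have hlel := pvLf_le_left cs1 cs2 (i + 1) (j + 1)
      have hler := pvLf_le_right cs1 cs2 (i + 1) (j + 1)
      by_cases hKi : ℓ ≤ i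
      · by_cases hKj : ℓ ≤ j
        · have hd1 : (List.drop (i - ℓ) cs1)[ℓ]? = cs1[i]? := by
            rw [List.getElem?_drop]; congr 1; omega
          have hd2 : (List.drop (j - ℓ) cs2)[ℓ]? = cs2[j]? := by
            rw [List.getElem?_drop]; congr 1; omega
          have hidx : i + 1 - (ℓ + 1) = i - ℓ := by omega
          have hjdx : j + 1 - (ℓ + 1) = j - ℓ := by omega
          have hlen : (List.take ℓ (List.drop (i - ℓ) cs1)).length =
              (List.take ℓ (List.drop (j - ℓ) cs2)).length := by
            rw [List.length_take, List.length_take, List.length_drop, List.length_drop]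
            omega
          simp only [pvLf]
          rw [hidx, hjdx, List.take_add_one, List.take_add_one]
          split_ifs with hch
          · constructor
            · intro h
              obtain ⟨h1, h2, h3⟩ := (ih i j (by omega) (by omega)).mp (by omega)
              refine ⟨by omega, by omega, ?_⟩
              rw [h3, hd1, hd2, hch]
            · rintro ⟨h1, h2, h3⟩
              obtain ⟨hpre, -⟩ := List.append_inj h3 hlen
              have := (ih i j (by omega) (by omega)).mpr ⟨hKi, hKj, hpre⟩
              omega
          · constructor
            · intro h; omega
            · rintro ⟨h1, h2, h3⟩
              exfalso
              obtain ⟨-, hsuf⟩ := List.append_inj h3 hlen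
              rw [hd1, hd2, List.getElem?_eq_getElem hi', List.getElem?_eq_getElem hj'] at hsuf
              simp only [Option.toList_some, List.cons.injEq] at hsuf
              exact hch (by rw [List.getElem?_eq_getElem hi', List.getElem?_eq_getElem hj',
                hsuf.1])
        · constructor
          · intro h; omega
          · rintro ⟨-, h2, -⟩; omega
      · constructor
        · intro h; omega
        · rintro ⟨h1, -, -⟩; omega

lemma pvRowMax_ge (cs1 cs2 : List Char) (i j c : Nat) (hc : c ≤ j) :
    pvLf cs1 cs2 i c ≤ pvRowMax cs1 cs2 i j := by
  induction j with
  | zero =>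
    interval_cases c
    cases i <;> simp [pvLf, pvRowMax]
  | succ j ih =>
    rcases Nat.lt_or_ge c (j+1) with h | h
    · exact le_trans (ih (by omega)) (le_max_left _ _)
    · have : c = j + 1 := by omega
      subst this
      exact le_max_right _ _

lemma pvRowMax_attained (cs1 cs2 : List Char) (i j : Nat) :
    ∃ c, c ≤ j ∧ pvLf cs1 cs2 i c = pvRowMax cs1 cs2 i j := by
  induction j with
  | zero => exact ⟨0, le_rfl, by cases i <;> simp [pvLf, pvRowMax]⟩
  | succ j ih =>
    obtain ⟨c, hc, he⟩ := ih
    simp only [pvRowMax]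
    rcases le_total (pvRowMax cs1 cs2 i j) (pvLf cs1 cs2 i (j+1)) with h | h
    · exact ⟨j+1, le_rfl, by omega⟩
    · exact ⟨c, by omega, by omega⟩

lemma pvMaxUpTo_ge (cs1 cs2 : List Char) (i r c : Nat) (hr : r ≤ i) (hc : c ≤ cs2.length) :
    pvLf cs1 cs2 r c ≤ pvMaxUpTo cs1 cs2 i := by
  induction i with
  | zero =>
    interval_cases r
    cases c <;> simp [pvLf, pvMaxUpTo]
  | succ i ih =>
    rcases Nat.lt_or_ge r (i+1) with h | h
    · exact le_trans (ih (by omega)) (le_max_left _ _)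
    · have : r = i + 1 := by omega
      subst this
      exact le_trans (pvRowMax_ge cs1 cs2 (i+1) cs2.length c hc) (le_max_right _ _)

lemma pvMaxUpTo_attained (cs1 cs2 : List Char) (i : Nat) :
    ∃ r c, r ≤ i ∧ c ≤ cs2.length ∧ pvLf cs1 cs2 r c = pvMaxUpTo cs1 cs2 i := by
  induction i with
  | zero => exact ⟨0, 0, le_rfl, Nat.zero_le _, by simp [pvLf, pvMaxUpTo]⟩
  | succ i ih =>
    obtain ⟨r, c, hr, hc, he⟩ := ih
    simp only [pvMaxUpTo]
    rcases le_total (pvMaxUpTo cs1 cs2 i) (pvRowMax cs1 cs2 (i+1) cs2.length) with h | h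
    · obtain ⟨c', hc', he'⟩ := pvRowMax_attained cs1 cs2 (i+1) cs2.length
      exact ⟨i+1, c', le_rfl, hc', by omega⟩
    · exact ⟨r, c, by omega, hc, by omega⟩

lemma pvBig_le (cs1 cs2 : List Char) : pvBig cs1 cs2 ≤ min cs1.length cs2.length := by
  obtain ⟨r, c, hr, hc, he⟩ := pvMaxUpTo_attained cs1 cs2 cs1.length
  unfold pvBig
  rw [← he]
  exact le_min (le_trans (pvLf_le_left _ _ _ _) hr) (le_trans (pvLf_le_right _ _ _ _) hc)

lemma pvWindow_any_iff (cs1 cs2 : List Char) (ℓ : Nat) (_hℓ : 1 ≤ ℓ) :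
    ((pvWindows cs2 ℓ).any
        (fun w => PySem.Set.contains (PySem.Set.ofList (pvWindows cs1 ℓ)) w) = true) ↔
      ∃ i j, i ≤ cs1.length ∧ j ≤ cs2.length ∧ ℓ ≤ pvLf cs1 cs2 i j := by
  unfold pvWindows
  rw [List.any_eq_true]
  simp only [List.mem_map, PySem.Set.contains_iff, PySem.Set.mem_ofList,
    PySem.List.mem_pyRange_one, PySem.List.len_eq]
  constructor
  · rintro ⟨w, ⟨b, ⟨hb0, hb1⟩, rfl⟩, a, ⟨ha0, ha1⟩, heq⟩
    refine ⟨a.toNat + ℓ, b.toNat + ℓ, by omega, by omega, ?_⟩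
    rw [pvLf_seg_iff cs1 cs2 ℓ _ _ (by omega) (by omega)]
    refine ⟨by omega, by omega, ?_⟩
    have ea : a = ((a.toNat : Nat) : Int) := by omega
    have eb : b = ((b.toNat : Nat) : Int) := by omega
    rw [ea, eb, PySem.List.slice_natCast_add, PySem.List.slice_natCast_add] at heq
    rw [show a.toNat + ℓ - ℓ = a.toNat from by omega,
      show b.toNat + ℓ - ℓ = b.toNat from by omega]
    exact heq
  · rintro ⟨i, j, hi, hj, hLf⟩
    obtain ⟨hKi, hKj, hseg⟩ := (pvLf_seg_iff cs1 cs2 ℓ i j hi hj).mp hLf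
    refine ⟨_, ⟨((j - ℓ : Nat) : Int), ⟨by omega, by omega⟩, rfl⟩,
      ((i - ℓ : Nat) : Int), ⟨by omega, by omega⟩, ?_⟩
    rw [PySem.List.slice_natCast_add, PySem.List.slice_natCast_add]
    exact hseg

lemma pvLcsLenRec_eq (cs1 cs2 : List Char) (fuel : Nat) (hb : pvBig cs1 cs2 ≤ fuel) :
    pvLcsLenRec cs1 cs2 fuel = (pvBig cs1 cs2 : Int) := by
  induction fuel with
  | zero =>
    have : pvBig cs1 cs2 = 0 := by omega
    rw [this]
    rfl
  | succ f ihf =>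
    simp only [pvLcsLenRec]
    split_ifs with hm
    · obtain ⟨i, j, hi, hj, hLf⟩ := (pvWindow_any_iff cs1 cs2 (f + 1) (by omega)).mp hm
      have hle : f + 1 ≤ pvBig cs1 cs2 := le_trans hLf (pvMaxUpTo_ge cs1 cs2 _ i j hi hj)
      have : pvBig cs1 cs2 = f + 1 := by omega
      rw [this]
      push_cast
      ring
    · have hne : pvBig cs1 cs2 ≠ f + 1 := by
        intro hBig
        obtain ⟨r, c, hr, hc, he⟩ := pvMaxUpTo_attained cs1 cs2 cs1.length
        exact hm ((pvWindow_any_iff cs1 cs2 (f + 1) (by omega)).mpr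
          ⟨r, c, hr, hc, by unfold pvBig at hBig; omega⟩)
      exact ihf (by omega)

lemma pvLcsLen_eq (s1 s2 : String) : pvLcsLen s1 s2 = (pvBig s1.toList s2.toList : Int) := by
  unfold pvLcsLen
  exact pvLcsLenRec_eq s1.toList s2.toList _ (pvBig_le s1.toList s2.toList)

-- the two per-pair scores agree
lemma pvScore_eq (s1 s2 : String) :
    PySem.Str.len (longest_common_substring s1 s2) = pvLcsLen s1 s2 := by
  rw [lcsA_len, pvLcsLen_eq]

-- first maximum of f over a list, scanning from the left
def pvPick (f : String → Int) : List String → String × Int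
  | [] => ("", 0)
  | x :: xs => let r := pvPick f xs; if f x ≥ r.2 then (x, f x) else r

lemma pvFoldA_gen (f : String → Int) (l : List String) (mj : String) (lm : Int) (h0 : 0 ≤ lm) :
    l.foldl (fun st n2 => if f n2 > st.2 then (n2, f n2) else st) (mj, lm) =
      if (pvPick f l).2 > lm then pvPick f l else (mj, lm) := by
  induction l generalizing mj lm with
  | nil =>
    simp only [List.foldl_nil, pvPick]
    rw [if_neg (by omega)]
  | cons x xs ih =>
    simp only [List.foldl_cons, pvPick]
    by_cases h1 : f x > lm
    · rw [if_pos h1, ih x (f x) (le_trans h0 h1.le)]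
      split_ifs <;> simp_all <;> omega
    · rw [if_neg h1, ih mj lm h0]
      split_ifs <;> simp_all <;> omega

lemma pvPick_cons_snd (f : String → Int) (x : String) (xs : List String) :
    (pvPick f (x :: xs)).2 = max (f x) (pvPick f xs).2 := by
  simp only [pvPick]
  split_ifs <;> omega

lemma pvFoldlMax_pick (f : String → Int) (l : List String) (hf : ∀ x ∈ l, 0 ≤ f x)
    (a : Int) (h0 : 0 ≤ a) :
    (l.map f).foldl max a = max a (pvPick f l).2 := by
  induction l generalizing a with
  | nil => simp [pvPick, max_eq_left h0]
  | cons x xs ih =>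
    simp only [List.map_cons, List.foldl_cons]
    rw [ih (fun y hy => hf y (by simp [hy])) (max a (f x))
      (le_trans h0 (le_max_left _ _)), pvPick_cons_snd, max_assoc]

lemma pvPick_index (f : String → Int) (l : List String) (hf : ∀ x ∈ l, 0 ≤ f x)
    (hp : 0 < (pvPick f l).2) :
    ∃ k, PySem.List.index? (l.map f) (pvPick f l).2 = some k ∧ l[k]? = some (pvPick f l).1 := by
  induction l with
  | nil => simp [pvPick] at hp
  | cons x xs ih =>
    simp only [pvPick] at hp ⊢
    by_cases h2 : f x ≥ (pvPick f xs).2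
    · rw [if_pos h2] at hp ⊢
      exact ⟨0, PySem.List.index?_cons_self _ _, rfl⟩
    · rw [if_neg h2] at hp ⊢
      have hx : f x ≠ (pvPick f xs).2 := by omega
      obtain ⟨k, hk, hg⟩ := ih (fun y hy => hf y (by simp [hy])) hp
      refine ⟨k + 1, ?_, by simpa using hg⟩
      rw [List.map_cons, PySem.List.index?_cons_of_ne _ hx, hk]
      rfl

lemma pvBestMatch_eq (n1 : String) (l : List String) :
    pvBestMatch n1 l =
      (if (pvPick (pvLcsLen n1) l).2 > 0 then (pvPick (pvLcsLen n1) l).1 else "") := by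
  have hf : ∀ x ∈ l, 0 ≤ pvLcsLen n1 x := by
    intro x _
    rw [pvLcsLen_eq]
    exact Int.natCast_nonneg _
  cases l with
  | nil => simp [pvBestMatch, pvPick]
  | cons x xs =>
    have hmax : PySem.List.maxD ((x :: xs).map (fun n2 => pvLcsLen n1 n2)) (fun y => y) 0 =
        (pvPick (pvLcsLen n1) (x :: xs)).2 := by
      rw [List.map_cons, PySem.List.maxD, PySem.List.max?_id_cons, Option.getD_some]
      rw [show List.map (fun n2 => pvLcsLen n1 n2) xs = List.map (pvLcsLen n1) xs from rfl,
        pvFoldlMax_pick (pvLcsLen n1) xs (fun y hy => hf y (by simp [hy])) _ (hf x (by simp)),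
        pvPick_cons_snd]
    simp only [pvBestMatch, hmax]
    split_ifs with hpos
    · obtain ⟨k, hk, hg⟩ := pvPick_index (pvLcsLen n1) (x :: xs) hf hpos
      rw [show List.map (fun n2 => pvLcsLen n1 n2) (x :: xs) =
        List.map (pvLcsLen n1) (x :: xs) from rfl, hk]
      simp only [PySem.List.pyGet?_natCast, hg, Option.getD_some]
    · rfl

-- ===== VERDICT (by name: the statement is the Claim_ definition above) =====
theorem relacionar_nombres_spec : Claim_equal_relacionar_nombres := by
  intro arr1 arr2 _
  unfold Spec_relacionar_nombres relacionar_nombres relacionar_nombres_alt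
  congr 1
  apply PySem.List.foldl_congr_mem
  intro d n1 _
  show d.insert n1 (arr2.foldl (fun st n2 =>
      let lcs := longest_common_substring n1 n2
      if PySem.Str.len lcs > st.2 then (n2, PySem.Str.len lcs) else st) ("", (0:Int))).1
    = d.insert n1 (pvBestMatch n1 arr2)
  congr 1
  have hstep : (fun (st : String × Int) n2 =>
      let lcs := longest_common_substring n1 n2
      if PySem.Str.len lcs > st.2 then (n2, PySem.Str.len lcs) else st) =
      (fun (st : String × Int) n2 => if pvLcsLen n1 n2 > st.2 then (n2, pvLcsLen n1 n2) else st) := by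
    funext st n2
    simp only [pvScore_eq]
  rw [hstep, pvFoldA_gen (pvLcsLen n1) arr2 "" 0 le_rfl, pvBestMatch_eq]
  split <;> rfl
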